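-- pv_equiv track=rewrite | github.com/Serge-2019/algoritms | lesson04/task1a.py | max_zip
-- ===== SOURCE A (Python) =====
-- def max_zip(mas):
--     mx = -1
--     res = zip(*mas)  # транспонируем матрицу
--     for row in res:
--         n = min(row)
--         if n > mx:
--             mx = n
--     return mx
-- ===== SOURCE B (Python) =====
-- def max_zip(mas):
--     if not mas:
--         return -1
--     mins = list(mas[0])
--     for row in mas[1:]:
--         mins = [m if m < v else v for m, v in zip(mins, row)]
--     if not mins:
--         return -1
--     best = mins[0]
--     for m in mins[1:]:
--         if m > best:
--             best = m
--     return best if best > -1 else -1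
-- ===== Notes on version B (the rewrite author's own statement) =====
-- stated objective: alternative
-- what changed: B never transposes: it folds the rows into a single running per-column-minimum list (zip truncation gives the shortest-row cap for free) and then takes the max of that list floored at -1, instead of A's explicit transpose followed by a min-per-column scan.
import Mathlib
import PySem

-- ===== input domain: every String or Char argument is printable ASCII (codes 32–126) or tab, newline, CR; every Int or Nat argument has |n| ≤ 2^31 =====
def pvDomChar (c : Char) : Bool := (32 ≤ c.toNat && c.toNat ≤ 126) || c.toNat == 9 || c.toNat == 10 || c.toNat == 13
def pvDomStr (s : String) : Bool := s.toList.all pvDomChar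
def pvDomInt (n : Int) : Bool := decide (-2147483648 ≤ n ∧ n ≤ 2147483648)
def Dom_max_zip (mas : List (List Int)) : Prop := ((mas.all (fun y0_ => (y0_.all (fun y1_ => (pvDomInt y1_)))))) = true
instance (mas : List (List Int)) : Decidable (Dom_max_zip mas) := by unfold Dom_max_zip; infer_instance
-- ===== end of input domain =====

-- B avoids A's explicit transpose: it folds the rows into one running per-column-minimum list
-- (zip truncation capping to the shortest row) and takes its max floored at -1 (objective: alternative).


-- ===== PORT A =====

-- helper for transp's termination measure
theorem pvSumTailLe (mas : List (List Int)) :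
    ((mas.map (fun r => r.tail)).map List.length).sum ≤ (mas.map List.length).sum := by
  induction mas with
  | nil => simp
  | cons x xs ih =>
    simp only [List.map_cons, List.sum_cons]
    have := List.length_tail (l := x)
    omega

-- zip(*mas): transpose truncated to the shortest row (Python zip stops at the shortest iterator)
def transp (mas : List (List Int)) : List (List Int) :=
  if h : mas = [] ∨ mas.any (fun r => r.isEmpty) then []
  else (mas.map (fun r => r.head!)) :: transp (mas.map (fun r => r.tail))
termination_by (mas.map List.length).sum
decreasing_by
  rw [not_or] at h
  obtain ⟨hne, hall⟩ := h
  match mas, hne with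
  | x :: xs, _ =>
    simp only [List.any_cons, Bool.or_eq_true, List.any_eq_true] at hall
    have hx : x ≠ [] := by
      intro hx; exact hall (Or.inl (by simp [hx]))
    have hlt : x.tail.length < x.length := by
      cases x with
      | nil => exact absurd rfl hx
      | cons a as => simp
    have := pvSumTailLe xs
    rw [List.map_map] at this
    simp only [Function.comp_def] at this
    simp only [List.map_cons, List.sum_cons, List.map_attach_eq_pmap, List.pmap_eq_map,
      List.map_map, Function.comp_def]
    omega

-- min(row) on a nonempty tuple (the 0 branch is unreachable: zip's columns are never empty;
-- Python would raise ValueError there)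
def colmin (col : List Int) : Int :=
  match col with
  | [] => 0
  | x :: xs => xs.foldl min x

def max_zip (mas : List (List Int)) : Int :=
  (transp mas).foldl (fun mx row => let n := colmin row; if n > mx then n else mx) (-1)

-- ===== PORT B =====

-- one comprehension step: [m if m < v else v for m, v in zip(mins, row)]
def zminRow (mins row : List Int) : List Int :=
  (mins.zip row).map (fun p => if p.1 < p.2 then p.1 else p.2)

def max_zip_alt (mas : List (List Int)) : Int :=
  match mas with
  | [] => -1
  | r :: rest =>
    let mins := rest.foldl zminRow r
    match mins with
    | [] => -1
    | m :: ms =>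
      let best := ms.foldl (fun b x => if x > b then x else b) m
      if best > -1 then best else -1

-- ===== PRECONDITION & SPEC =====
def Spec_max_zip (mas : List (List Int)) (out : Int) : Prop := out = max_zip_alt mas
instance (mas : List (List Int)) (out : Int) : Decidable (Spec_max_zip mas out) := by unfold Spec_max_zip; infer_instance

-- ===== CLAIM (what is proved, stated in full; the proofs are below) =====
def Claim_equal_max_zip : Prop := ∀ (mas : List (List Int)), Dom_max_zip mas → Spec_max_zip mas (max_zip mas)

-- ===== LEMMAS AND PROOFS =====

-- the list of per-column minimums A effectively computes
def CM (mas : List (List Int)) : List Int := (transp mas).map colmin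

theorem if_gt_eq_max (b x : Int) : (if x > b then x else b) = max b x := by
  rw [max_def]; split <;> split <;> omega

theorem foldl_if_eq_foldl_max (l : List Int) (b : Int) :
    l.foldl (fun b x => if x > b then x else b) b = l.foldl max b := by
  induction l generalizing b with
  | nil => rfl
  | cons x xs ih => simp only [List.foldl_cons, if_gt_eq_max]

theorem zminRow_head (x y : Int) (a b : List Int) :
    zminRow (x :: a) (y :: b) = (if x < y then x else y) :: zminRow a b := by
  simp [zminRow]

theorem colmin_cons_cons (x y : Int) (l : List Int) :
    colmin (x :: y :: l) = colmin ((if x < y then x else y) :: l) := by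
  simp only [colmin, List.foldl_cons]
  congr 1
  rw [min_def]; split <;> split <;> omega

theorem transp_step (mas : List (List Int)) (h1 : mas ≠ [])
    (h2 : ¬ mas.any (fun r => r.isEmpty) = true) :
    transp mas = (mas.map (fun r => r.head!)) :: transp (mas.map (fun r => r.tail)) := by
  conv_lhs => rw [transp]
  rw [dif_neg (by simp [h1, h2])]

theorem transp_stop (mas : List (List Int)) (h2 : mas.any (fun r => r.isEmpty) = true) :
    transp mas = [] := by
  conv_lhs => rw [transp]
  rw [dif_pos (Or.inr h2)]

-- folding two rows into one with zminRow leaves the column minimums unchanged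
theorem CM_fuse (a b : List Int) (rest : List (List Int)) :
    CM (a :: b :: rest) = CM (zminRow a b :: rest) := by
  induction a generalizing b rest with
  | nil => simp [CM, transp, zminRow]
  | cons x a' ih =>
    cases b with
    | nil => simp [CM, transp, zminRow]
    | cons y b' =>
      by_cases hr : rest.any (fun r => r.isEmpty) = true
      · rw [CM, CM, transp_stop _ (by simp [hr]), transp_stop _ (by simp [hr])]
      · rw [CM, CM, zminRow_head]
        rw [transp_step ((x :: a') :: (y :: b') :: rest) (by simp) (by simp [hr])]
        rw [transp_step (((if x < y then x else y) :: zminRow a' b') :: rest)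
              (by simp) (by simp [hr])]
        simp only [List.map_cons, List.head!_cons, List.tail_cons]
        rw [colmin_cons_cons]
        have h := ih b' (rest.map (fun r => r.tail))
        rw [CM, CM] at h
        rw [h]

theorem CM_single (r : List Int) : CM [r] = r := by
  induction r with
  | nil => rw [CM, transp]; simp
  | cons x xs ih =>
    rw [CM, transp_step [x :: xs] (by simp) (by simp)]
    simpa [CM, colmin] using ih

theorem CM_eq_foldl (r : List Int) (rest : List (List Int)) :
    CM (r :: rest) = rest.foldl zminRow r := by
  induction rest generalizing r with
  | nil => exact CM_single r
  | cons b t ih => rw [CM_fuse, ih, List.foldl_cons]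

theorem foldl_max_push (ms : List Int) (m c : Int) :
    max c (ms.foldl max m) = ms.foldl max (max c m) := by
  induction ms generalizing m c with
  | nil => rfl
  | cons x xs ih =>
    simp only [List.foldl_cons, ih, max_assoc]

theorem foldl_if_colmin (l : List (List Int)) (b : Int) :
    l.foldl (fun mx row => let n := colmin row; if n > mx then n else mx) b
      = l.foldl (fun x y => max x (colmin y)) b := by
  induction l generalizing b with
  | nil => rfl
  | cons r rs ih => simp only [List.foldl_cons, if_gt_eq_max]

theorem max_zip_eq_CM (mas : List (List Int)) :
    max_zip mas = (CM mas).foldl max (-1) := by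
  rw [max_zip, CM, List.foldl_map, foldl_if_colmin]

-- ===== VERDICT (by name: the statement is the Claim_ definition above) =====
theorem max_zip_spec : Claim_equal_max_zip := by
  intro mas _
  unfold Spec_max_zip
  cases mas with
  | nil => rw [max_zip_eq_CM, CM, transp]; simp [max_zip_alt]
  | cons r rest =>
    rw [max_zip_eq_CM, CM_eq_foldl, max_zip_alt]
    cases h : rest.foldl zminRow r with
    | nil => simp
    | cons m ms =>
      simp only [foldl_if_eq_foldl_max, List.foldl_cons]
      rw [← foldl_max_push]
      rw [max_def]; split <;> split <;> omega
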